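-- pv_equiv track=rewrite | github.com/EmilyHuang111/tetris | genetic_helpers.py | get_wells
-- ===== SOURCE A (Python) =====
-- def get_wells(peaks):
--     wells = []
--     for i in range(len(peaks)):
--         if i == 0:
--             w = peaks[1] - peaks[0] if len(peaks) > 1 else 0
--             wells.append(max(w, 0))
--         elif i == len(peaks) - 1:
--             w = peaks[-2] - peaks[-1] if len(peaks) > 1 else 0
--             wells.append(max(w, 0))
--         else:
--             w1 = peaks[i - 1] - peaks[i]
--             w2 = peaks[i + 1] - peaks[i]
--             wells.append(max(w1, 0) if w1 >= w2 else max(w2, 0))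
--     return wells
-- ===== SOURCE B (Python) =====
-- def get_wells(peaks):
--     # Edge-scatter: each adjacent pair contributes its height drop to the lower side.
--     wells = [0] * len(peaks)
--     for i in range(len(peaks) - 1):
--         d = peaks[i + 1] - peaks[i]
--         if d > 0:
--             wells[i] = max(wells[i], d)
--         else:
--             wells[i + 1] = max(wells[i + 1], -d)
--     return wells
-- ===== Notes on version B (the rewrite author's own statement) =====
-- stated objective: alternative
-- what changed: Replaces A's per-index gather (four-way branch over positions, reading both neighbours with negative indexing) by an edge-scatter pass: iterate over the n-1 adjacent pairs and accumulate each pair's height drop into the lower endpoint of a preallocated zero array.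
import Mathlib
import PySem

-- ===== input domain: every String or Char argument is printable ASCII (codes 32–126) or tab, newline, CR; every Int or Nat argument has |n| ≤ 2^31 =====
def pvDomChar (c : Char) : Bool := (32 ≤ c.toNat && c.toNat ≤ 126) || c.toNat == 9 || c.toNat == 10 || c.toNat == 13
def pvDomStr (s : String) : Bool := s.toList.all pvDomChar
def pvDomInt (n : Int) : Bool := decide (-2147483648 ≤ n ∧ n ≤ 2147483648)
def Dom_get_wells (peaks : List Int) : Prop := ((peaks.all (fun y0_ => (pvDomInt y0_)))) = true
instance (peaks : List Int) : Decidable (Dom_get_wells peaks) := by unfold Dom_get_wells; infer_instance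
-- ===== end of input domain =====

-- B replaces A's per-index gather (four-way branch, negative indexing) by an edge-scatter
-- pass: each adjacent pair contributes its height drop to a preallocated zero array. Alternative.

-- ===== PORT A =====
-- all indices A uses are in range on the branch that uses them, so pyGetD with default 0 is exact
def get_wells (peaks : List Int) : List Int :=
  (PySem.List.pyRange 0 peaks.length 1).foldl (fun wells i =>
    if i = 0 then
      let w : Int := if peaks.length > 1 then
          PySem.List.pyGetD peaks 1 0 - PySem.List.pyGetD peaks 0 0 else 0
      wells ++ [max w 0]
    else if i = (peaks.length : Int) - 1 then
      let w : Int := if peaks.length > 1 then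
          PySem.List.pyGetD peaks (-2) 0 - PySem.List.pyGetD peaks (-1) 0 else 0
      wells ++ [max w 0]
    else
      let w1 : Int := PySem.List.pyGetD peaks (i - 1) 0 - PySem.List.pyGetD peaks i 0
      let w2 : Int := PySem.List.pyGetD peaks (i + 1) 0 - PySem.List.pyGetD peaks i 0
      wells ++ [if w1 ≥ w2 then max w1 0 else max w2 0]) []

-- ===== PORT B =====
-- every index B reads or writes is a nonnegative in-range index, so getD / List.set are exact
def get_wells_alt (peaks : List Int) : List Int :=
  (List.range (peaks.length - 1)).foldl (fun wells i =>
    let d : Int := peaks.getD (i + 1) 0 - peaks.getD i 0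
    if d > 0 then wells.set i (max (wells.getD i 0) d)
    else wells.set (i + 1) (max (wells.getD (i + 1) 0) (-d)))
    (List.replicate peaks.length 0)

-- ===== PRECONDITION & SPEC =====
def Spec_get_wells (peaks : List Int) (out : List Int) : Prop := out = get_wells_alt peaks
instance (peaks : List Int) (out : List Int) : Decidable (Spec_get_wells peaks out) := by unfold Spec_get_wells; infer_instance

-- ===== CLAIM (what is proved, stated in full; the proofs are below) =====
def Claim_equal_get_wells : Prop := ∀ (peaks : List Int), Dom_get_wells peaks → Spec_get_wells peaks (get_wells peaks)

-- ===== LEMMAS AND PROOFS =====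

-- left / right neighbour drops and the per-index value both programs compute (proof helpers only)
def pvL (peaks : List Int) (j : Nat) : Int :=
  if 0 < j then peaks.getD (j - 1) 0 - peaks.getD j 0 else 0
def pvR (peaks : List Int) (j : Nat) : Int :=
  if j < peaks.length - 1 then peaks.getD (j + 1) 0 - peaks.getD j 0 else 0
def pvG (peaks : List Int) (j : Nat) : Int := max (max (pvL peaks j) (pvR peaks j)) 0

-- A's loop body as a per-index function (proof helper only)
def pvA (peaks : List Int) (i : Int) : Int :=
  if i = 0 then
    max (if peaks.length > 1 then
        PySem.List.pyGetD peaks 1 0 - PySem.List.pyGetD peaks 0 0 else 0) 0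
  else if i = (peaks.length : Int) - 1 then
    max (if peaks.length > 1 then
        PySem.List.pyGetD peaks (-2) 0 - PySem.List.pyGetD peaks (-1) 0 else 0) 0
  else
    let w1 : Int := PySem.List.pyGetD peaks (i - 1) 0 - PySem.List.pyGetD peaks i 0
    let w2 : Int := PySem.List.pyGetD peaks (i + 1) 0 - PySem.List.pyGetD peaks i 0
    if w1 ≥ w2 then max w1 0 else max w2 0

theorem pvA_foldl (peaks : List Int) (l : List Int) (acc : List Int) :
    l.foldl (fun wells i =>
      if i = 0 then
        let w : Int := if peaks.length > 1 then
            PySem.List.pyGetD peaks 1 0 - PySem.List.pyGetD peaks 0 0 else 0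
        wells ++ [max w 0]
      else if i = (peaks.length : Int) - 1 then
        let w : Int := if peaks.length > 1 then
            PySem.List.pyGetD peaks (-2) 0 - PySem.List.pyGetD peaks (-1) 0 else 0
        wells ++ [max w 0]
      else
        let w1 : Int := PySem.List.pyGetD peaks (i - 1) 0 - PySem.List.pyGetD peaks i 0
        let w2 : Int := PySem.List.pyGetD peaks (i + 1) 0 - PySem.List.pyGetD peaks i 0
        wells ++ [if w1 ≥ w2 then max w1 0 else max w2 0]) acc
    = acc ++ l.map (pvA peaks) := by
  induction l generalizing acc with
  | nil => simp
  | cons x xs ih =>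
    simp only [List.foldl_cons, List.map_cons, ih]
    have hx : (if x = 0 then
        acc ++ [max (if peaks.length > 1 then
            PySem.List.pyGetD peaks 1 0 - PySem.List.pyGetD peaks 0 0 else 0) 0]
      else if x = (peaks.length : Int) - 1 then
        acc ++ [max (if peaks.length > 1 then
            PySem.List.pyGetD peaks (-2) 0 - PySem.List.pyGetD peaks (-1) 0 else 0) 0]
      else
        let w1 : Int := PySem.List.pyGetD peaks (x - 1) 0 - PySem.List.pyGetD peaks x 0
        let w2 : Int := PySem.List.pyGetD peaks (x + 1) 0 - PySem.List.pyGetD peaks x 0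
        acc ++ [if w1 ≥ w2 then max w1 0 else max w2 0]) = acc ++ [pvA peaks x] := by
      unfold pvA; split_ifs <;> rfl
    rw [hx, List.append_assoc]
    rfl

theorem pv_pointwise (peaks : List Int) (i : Nat) (hi : i < peaks.length) :
    pvA peaks (i : Int) = pvG peaks i := by
  have hg : ∀ k : Nat, PySem.List.pyGetD peaks (k : Int) 0 = peaks.getD k 0 :=
    fun k => PySem.List.pyGetD_natCast peaks k 0
  unfold pvA pvG pvL pvR
  by_cases h0 : i = 0
  · subst h0
    rw [if_pos (show ((0 : Nat) : Int) = 0 by norm_num)]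
    rw [if_neg (lt_irrefl 0)]
    by_cases h1 : peaks.length > 1
    · rw [if_pos h1, if_pos (show 0 < peaks.length - 1 by omega)]
      have e1 : PySem.List.pyGetD peaks 1 0 = peaks.getD 1 0 := by
        have := hg 1; simpa using this
      have e0 : PySem.List.pyGetD peaks 0 0 = peaks.getD 0 0 := by
        have := hg 0; simpa using this
      rw [e1, e0]
      simp only [Nat.zero_add]
      omega
    · rw [if_neg h1, if_neg (show ¬ 0 < peaks.length - 1 by omega)]
      omega
  · by_cases hlast : i = peaks.length - 1
    · have h1 : peaks.length > 1 := by omega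
      rw [if_neg (show ¬ ((i : Int) = 0) by omega),
          if_pos (show (i : Int) = (peaks.length : Int) - 1 by omega), if_pos h1]
      rw [if_pos (show 0 < i by omega), if_neg (show ¬ i < peaks.length - 1 by omega)]
      rw [PySem.List.pyGetD_neg_ofNat peaks 2 0 (by omega) (by omega),
          PySem.List.pyGetD_neg_ofNat peaks 1 0 (by omega) (by omega)]
      rw [List.getD_eq_getElem peaks 0 (show i - 1 < peaks.length by omega),
          List.getD_eq_getElem peaks 0 (show i < peaks.length by omega)]
      simp only [show peaks.length - 2 = i - 1 from by omega,
                 show peaks.length - 1 = i from by omega]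
      omega
    · have hil : i < peaks.length - 1 := by omega
      have hip : 0 < i := by omega
      rw [if_neg (show ¬ ((i : Int) = 0) by omega),
          if_neg (show ¬ ((i : Int) = (peaks.length : Int) - 1) by omega)]
      rw [if_pos hip, if_pos hil]
      have em : PySem.List.pyGetD peaks ((i : Int) - 1) 0 = peaks.getD (i - 1) 0 := by
        rw [show ((i : Int) - 1) = ((i - 1 : Nat) : Int) by omega, hg (i - 1)]
      have ep : PySem.List.pyGetD peaks ((i : Int) + 1) 0 = peaks.getD (i + 1) 0 := by
        rw [show ((i : Int) + 1) = ((i + 1 : Nat) : Int) by omega, hg (i + 1)]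
      dsimp only
      rw [em, ep, hg i]
      split_ifs <;> omega

-- A = map pvG over range n
theorem pvA_eq_map (peaks : List Int) :
    get_wells peaks = (List.range peaks.length).map (pvG peaks) := by
  unfold get_wells
  rw [pvA_foldl, PySem.List.pyRange_zero_natCast, List.map_map, List.nil_append]
  exact List.map_congr_left (fun i hi => pv_pointwise peaks i (List.mem_range.mp hi))

-- the intermediate state of B's scatter loop after processing the first m edges
def pvE (peaks : List Int) (m : Nat) : List Int :=
  (List.range peaks.length).map (fun j =>
    if j < m then pvG peaks j else if j = m then max (pvL peaks j) 0 else 0)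

theorem pvE_invariant (peaks : List Int) (m : Nat) (hm : m ≤ peaks.length - 1) :
    (List.range m).foldl (fun wells i =>
      let d : Int := peaks.getD (i + 1) 0 - peaks.getD i 0
      if d > 0 then wells.set i (max (wells.getD i 0) d)
      else wells.set (i + 1) (max (wells.getD (i + 1) 0) (-d)))
      (List.replicate peaks.length 0)
    = pvE peaks m := by
  induction m with
  | zero =>
    simp only [List.range_zero, List.foldl_nil, pvE]
    apply List.ext_getElem (by simp)
    intro j h1 h2
    simp only [List.getElem_replicate, List.getElem_map, List.getElem_range]
    have : ¬ j < 0 := by omega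
    rw [if_neg this]
    by_cases hj0 : j = 0
    · subst hj0; simp [pvL]
    · rw [if_neg hj0]
  | succ m ih =>
    have hm' : m ≤ peaks.length - 1 := by omega
    have hmn : m < peaks.length - 1 := by omega
    have hmlen : m < peaks.length := by omega
    have hm1len : m + 1 < peaks.length := by omega
    rw [List.range_succ, List.foldl_append, ih hm', List.foldl_cons, List.foldl_nil]
    dsimp only
    have hgetm : (pvE peaks m).getD m 0 = max (pvL peaks m) 0 := by
      rw [List.getD_eq_getElem _ 0 (by simp [pvE]; omega)]
      simp [pvE]
    have hgetm1 : (pvE peaks m).getD (m + 1) 0 = 0 := by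
      rw [List.getD_eq_getElem _ 0 (by simp [pvE]; omega)]
      simp only [pvE, List.getElem_map, List.getElem_range]
      rw [if_neg (by omega), if_neg (by omega)]
    have hR : pvR peaks m = peaks.getD (m + 1) 0 - peaks.getD m 0 := by
      unfold pvR; rw [if_pos hmn]
    have hL1 : pvL peaks (m + 1) = peaks.getD m 0 - peaks.getD (m + 1) 0 := by
      unfold pvL; rw [if_pos (by omega)]; simp
    set d : Int := peaks.getD (m + 1) 0 - peaks.getD m 0 with hd
    have hElen : (pvE peaks m).length = peaks.length := by simp [pvE]
    by_cases hdp : d > 0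
    · rw [if_pos hdp, hgetm]
      apply List.ext_getElem (by simp [pvE])
      intro j h1 h2
      have hjlen : j < peaks.length := by simpa [pvE] using h2
      rw [List.getElem_set]
      by_cases hjm : m = j
      · subst hjm
        rw [if_pos rfl]
        simp only [pvE, List.getElem_map, List.getElem_range]
        rw [if_pos (by omega)]
        unfold pvG
        rw [hR]
        omega
      · rw [if_neg hjm]
        simp only [pvE, List.getElem_map, List.getElem_range]
        by_cases hjlt : j < m
        · rw [if_pos hjlt, if_pos (by omega)]
        · rw [if_neg hjlt, if_neg (by omega), if_neg (by omega)]
          by_cases hje : j = m + 1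
          · subst hje
            rw [if_pos rfl, hL1]
            omega
          · rw [if_neg hje]
    · rw [if_neg hdp, hgetm1]
      apply List.ext_getElem (by simp [pvE])
      intro j h1 h2
      have hjlen : j < peaks.length := by simpa [pvE] using h2
      rw [List.getElem_set]
      by_cases hjm : m + 1 = j
      · subst hjm
        rw [if_pos rfl]
        simp only [pvE, List.getElem_map, List.getElem_range]
        rw [if_neg (by omega), if_pos trivial, hL1]
        omega
      · rw [if_neg hjm]
        simp only [pvE, List.getElem_map, List.getElem_range]
        by_cases hjlt : j < m
        · rw [if_pos hjlt, if_pos (by omega)]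
        · rw [if_neg hjlt]
          by_cases hje : j = m
          · subst hje
            rw [if_pos rfl, if_pos (by omega)]
            unfold pvG
            rw [hR]
            omega
          · rw [if_neg hje, if_neg (by omega), if_neg (by omega)]

theorem pvE_final (peaks : List Int) :
    pvE peaks (peaks.length - 1) = (List.range peaks.length).map (pvG peaks) := by
  unfold pvE
  apply List.map_congr_left
  intro j hj
  have hj' : j < peaks.length := List.mem_range.mp hj
  by_cases h : j < peaks.length - 1
  · rw [if_pos h]
  · have : j = peaks.length - 1 := by omega
    rw [if_neg h, if_pos this]
    unfold pvG pvR
    rw [if_neg (by omega)]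
    omega

-- ===== VERDICT (by name: the statement is the Claim_ definition above) =====
theorem get_wells_spec : Claim_equal_get_wells := by
  intro peaks _
  unfold Spec_get_wells get_wells_alt
  rw [pvE_invariant peaks (peaks.length - 1) le_rfl, pvE_final, pvA_eq_map]
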